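-- pv_equiv track=rewrite | github.com/chrischerian/Wordle | wordle.py | checkTriple
-- ===== SOURCE A (Python) =====
-- def checkTriple(wordle):
--     wordle = wordle.upper()
--     for i in wordle:
--         if wordle.count(i) > 2:
--             return True
--         else:
--             continue
--     return False
-- ===== SOURCE B (Python) =====
-- def checkTriple(wordle):
--     s = sorted(wordle.upper())
--     return any(a == b for a, b in zip(s, s[2:]))
-- ===== Notes on version B (the rewrite author's own statement) =====
-- stated objective: alternative
-- what changed: B sorts the upper-cased characters and scans once for two equal characters at distance 2 (equivalent to some character occurring more than twice, since equal characters are adjacent after sorting), replacing A's per-character repeated .count scans.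
import Mathlib
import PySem

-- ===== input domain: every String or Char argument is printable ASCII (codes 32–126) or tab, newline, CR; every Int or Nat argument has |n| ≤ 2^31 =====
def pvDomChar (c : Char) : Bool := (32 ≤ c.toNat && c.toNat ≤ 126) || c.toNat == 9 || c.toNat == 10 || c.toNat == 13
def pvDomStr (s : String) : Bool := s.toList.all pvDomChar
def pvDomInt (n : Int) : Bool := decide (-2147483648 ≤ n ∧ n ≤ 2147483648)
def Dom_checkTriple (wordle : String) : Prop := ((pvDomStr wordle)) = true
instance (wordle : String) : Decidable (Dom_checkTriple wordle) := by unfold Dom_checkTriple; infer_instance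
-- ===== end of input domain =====

-- B sorts the upper-cased characters and scans once for two equal characters at distance 2, instead of A's per-character repeated .count scans (alternative algorithm; same return value).

-- ===== PORT A =====
-- the for-loop with early 'return True'; wordle.count(i) for a 1-char i is the char count in the list of chars (exact)
def checkTripleLoop (u : List Char) : List Char → Bool
  | [] => false
  | i :: rest => if u.count i > 2 then true else checkTripleLoop u rest

def checkTriple (wordle : String) : Bool :=
  let u := (PySem.Str.upper wordle).toList
  checkTripleLoop u u

-- ===== PORT B =====
-- s = sorted(wordle.upper()); any(a == b for a, b in zip(s, s[2:]))
def checkTriple_alt (wordle : String) : Bool :=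
  let s := PySem.List.sorted ((PySem.Str.upper wordle).toList) (fun x => x) false
  (s.zip (PySem.List.slice s (some 2) none)).any (fun p => p.1 == p.2)

-- ===== PRECONDITION & SPEC =====
def Spec_checkTriple (wordle : String) (out : Bool) : Prop := out = checkTriple_alt wordle
instance (wordle : String) (out : Bool) : Decidable (Spec_checkTriple wordle out) := by unfold Spec_checkTriple; infer_instance

-- ===== CLAIM (what is proved, stated in full; the proofs are below) =====
def Claim_equal_checkTriple : Prop := ∀ (wordle : String), Dom_checkTriple wordle → Spec_checkTriple wordle (checkTriple wordle)

-- ===== LEMMAS AND PROOFS =====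

theorem checkTripleLoop_eq_any (u : List Char) (l : List Char) :
    checkTripleLoop u l = l.any (fun i => u.count i > 2) := by
  induction l with
  | nil => rfl
  | cons i rest ih =>
    simp only [checkTripleLoop, List.any_cons, ih]
    by_cases h : u.count i > 2 <;> simp [h]

-- A's loop is true iff some character has count ≥ 3
theorem checkTriple_iff (u : List Char) :
    checkTripleLoop u u = true ↔ ∃ ch : Char, 3 ≤ u.count ch := by
  rw [checkTripleLoop_eq_any, List.any_eq_true]
  constructor
  · rintro ⟨i, _, h⟩; exact ⟨i, by simpa using h⟩
  · rintro ⟨ch, h⟩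
    refine ⟨ch, ?_, by simpa using h⟩
    exact List.count_pos_iff.mp (by omega)

-- the zip-with-drop-2 scan, in recursive form
theorem zip_drop2_any (s : List Char) :
    (s.zip (s.drop 2)).any (fun p => p.1 == p.2)
      = match s with
        | a :: _ :: c :: _ => (a == c) || ((s.tail.zip ((s.tail).drop 2)).any (fun p => p.1 == p.2))
        | _ => false := by
  match s with
  | [] => rfl
  | [a] => rfl
  | [a, b] => rfl
  | a :: b :: c :: t => simp [List.zip]

-- on a sorted list, the distance-2 scan is true iff some char has count ≥ 3
theorem scan_iff_count (s : List Char) (hp : s.Pairwise (· ≤ ·)) :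
    (s.zip (s.drop 2)).any (fun p => p.1 == p.2) = true ↔ ∃ ch : Char, 3 ≤ s.count ch := by
  induction s with
  | nil => simp
  | cons a r ih =>
    match r with
    | [] =>
      simp
      intro x
      have h1 : List.count x [a] ≤ 1 := by
        simpa using List.count_le_length (l := [a]) (a := x)
      omega
    | [b] =>
      constructor
      · intro h; simp [List.zip] at h
      · rintro ⟨ch, h⟩
        have h2 : List.count ch [a, b] ≤ 2 := by
          simpa using List.count_le_length (l := [a, b]) (a := ch)
        omega
    | b :: c :: t =>
      obtain ⟨ha, hp'⟩ := List.pairwise_cons.mp hp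
      obtain ⟨hble, hp''⟩ := List.pairwise_cons.mp hp'
      obtain ⟨hcle, _⟩ := List.pairwise_cons.mp hp''
      have hab : a ≤ b := ha b (by simp)
      have hac : a ≤ c := ha c (by simp)
      rw [zip_drop2_any]
      simp only [List.tail_cons]
      constructor
      · intro h
        rcases Bool.or_eq_true_iff.mp h with h1 | h2
        · have hac' : a = c := by simpa using h1
          have hbc : b ≤ c := hble c (by simp)
          have hab' : a = b := le_antisymm hab (hac' ▸ hbc)
          refine ⟨a, ?_⟩
          simp [← hab', ← hac']
        · obtain ⟨ch, hch⟩ := (ih hp').mp h2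
          refine ⟨ch, ?_⟩
          rw [List.count_cons]
          split <;> omega
      · rintro ⟨ch, hch⟩
        by_cases hcha : ch = a
        · subst hcha
          have htail : 2 ≤ (b :: c :: t).count ch := by
            rw [List.count_cons_self] at hch
            omega
          have hb : b = ch := by
            by_contra hne
            have hmem : ch ∈ b :: c :: t := List.count_pos_iff.mp (by omega)
            rcases List.mem_cons.mp hmem with h' | hmem'
            · exact hne h'.symm
            · have h1 : b ≤ ch := hble ch hmem'
              have hlt : ch < b := lt_of_le_of_ne hab (fun h => hne h.symm)
              exact absurd h1 (not_le.mpr hlt)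
          have hcnt : 1 ≤ (c :: t).count ch := by
            rw [← hb] at htail ⊢
            rw [List.count_cons_self] at htail
            omega
          have hc : c = ch := by
            by_contra hne2
            have hmem2 : ch ∈ c :: t := List.count_pos_iff.mp (by omega)
            rcases List.mem_cons.mp hmem2 with h' | hmem'
            · exact hne2 h'.symm
            · have h1 : c ≤ ch := hcle ch hmem'
              exact hne2 (le_antisymm h1 hac)
          apply Bool.or_eq_true_iff.mpr; left
          simp [hc]
        · have hne : ch ≠ a := hcha
          have h3 : 3 ≤ (b :: c :: t).count ch := by
            rw [List.count_cons] at hch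
            have : ¬ ((a == ch) = true) := by simpa using fun h => hne h.symm
            simp [this] at hch
            omega
          exact Bool.or_eq_true_iff.mpr (Or.inr ((ih hp').mpr ⟨ch, h3⟩))

theorem slice2_drop (l : List Char) : PySem.List.slice l (some 2) none = l.drop 2 := by
  simpa using PySem.List.slice_from l (a := 2) (by norm_num)

-- ===== VERDICT (by name: the statement is the Claim_ definition above) =====
theorem checkTriple_spec : Claim_equal_checkTriple := by
  intro w _
  unfold Spec_checkTriple checkTriple checkTriple_alt
  simp only [slice2_drop]
  have hperm : (PySem.List.sorted ((PySem.Str.upper w).toList) (fun x => x) false).Perm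
      ((PySem.Str.upper w).toList) := PySem.List.sorted_perm _ (fun x => x) false
  have hpair : (PySem.List.sorted ((PySem.Str.upper w).toList) (fun x => x) false).Pairwise (· ≤ ·) := by
    simpa using PySem.List.sorted_pairwise ((PySem.Str.upper w).toList) (fun x => x)
  rw [Bool.eq_iff_iff, checkTriple_iff, scan_iff_count _ hpair]
  constructor <;> rintro ⟨ch, h⟩ <;> exact ⟨ch, by rwa [hperm.count_eq] at *⟩
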